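-- pv_equiv track=rewrite | github.com/paolosyloslabini/rank_similarity | RBO.py | list2rank
-- ===== SOURCE A (Python) =====
-- def list2rank(lista):
--     #create rank from disordered name-value list; put ties together.
--
--     val = lambda x: x[1];
--     ord = sorted(lista,key = val); #sort the list by second column;
--
--     ranked = [[ord[0][0],]]; #elements of this list will be ties-tuples
--     k = 0;
--     for i in range(1,len(ord)):
--         if ord[i][1] == ord[i-1][1]:
--             #put together equal values
--             ranked[k].append(ord[i][0]);
--         else:
--             #create new tuple for new values
--             k +=1;
--             ranked.append([ord[i][0],]);
--     return ranked;
-- ===== SOURCE B (Python) =====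
-- def list2rank(lista):
--     # group names by value with a dict, then emit groups of the sorted distinct values
--     groups = {}
--     for name, value in lista:
--         groups.setdefault(value, []).append(name)
--     return [groups[v] for v in sorted(groups)]
-- ===== Notes on version B (the rewrite author's own statement) =====
-- stated objective: idiomatic
-- what changed: B groups names by value in one dict pass (setdefault/append) and emits the groups of the sorted distinct values, instead of A's sort-the-whole-list followed by an adjacent-equality scan with an explicit group index k.
import Mathlib
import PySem

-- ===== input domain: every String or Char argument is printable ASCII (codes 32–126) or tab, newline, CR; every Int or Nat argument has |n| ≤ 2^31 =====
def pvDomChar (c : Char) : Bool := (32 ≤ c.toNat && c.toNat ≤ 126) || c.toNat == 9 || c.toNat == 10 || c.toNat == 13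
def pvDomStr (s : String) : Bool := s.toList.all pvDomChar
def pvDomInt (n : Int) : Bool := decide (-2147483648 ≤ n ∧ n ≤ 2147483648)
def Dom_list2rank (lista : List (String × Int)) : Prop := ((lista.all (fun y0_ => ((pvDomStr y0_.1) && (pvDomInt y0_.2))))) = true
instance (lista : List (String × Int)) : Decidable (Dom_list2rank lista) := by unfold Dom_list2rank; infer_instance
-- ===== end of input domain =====

-- B groups names by value with a dict built in one pass and emits groups of the sorted distinct
-- values, instead of A's sort-then-adjacent-scan; same O(n log n) cost, more idiomatic.


-- ===== PORT A =====
-- the for-loop: state (ranked, k), prev = value of the previous sorted element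
def list2rankGo (ranked : List (List String)) (k : Nat) (prev : Int) :
    List (String × Int) → List (List String)
  | [] => ranked
  | (n, v) :: rest =>
      if v == prev then
        list2rankGo (ranked.set k (ranked.getD k [] ++ [n])) k prev rest
      else
        list2rankGo (ranked ++ [[n]]) (k + 1) v rest

def list2rank (lista : List (String × Int)) : List (List String) :=
  let ord := PySem.List.sorted lista (fun x => x.2)
  match ord with
  | [] => []  -- Python raises IndexError here (ord[0]); excluded by Pre_list2rank
  | (n, v) :: rest => list2rankGo [[n]] 0 v rest

-- ===== PORT B =====
def list2rank_alt (lista : List (String × Int)) : List (List String) :=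
  let groups : PySem.Dict Int (List String) :=
    lista.foldl (fun d p => d.insert p.2 (d.getD p.2 [] ++ [p.1])) (PySem.Dict.mk [])
  (PySem.List.sorted groups.keys (fun v => v)).map (fun v => groups.getD v [])

-- ===== PRECONDITION & SPEC =====
-- Pre_ excludes only the empty list, on which Python A raises IndexError (ord[0]).
def Pre_list2rank (lista : List (String × Int)) : Prop := lista ≠ []
instance (lista : List (String × Int)) : Decidable (Pre_list2rank lista) := by unfold Pre_list2rank; infer_instance
def pvWitness_list2rank : (List (String × Int)) := [("a", 1), ("b", 0), ("c", 1)]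

def Spec_list2rank (lista : List (String × Int)) (out : List (List String)) : Prop := out = list2rank_alt lista
instance (lista : List (String × Int)) (out : List (List String)) : Decidable (Spec_list2rank lista out) := by unfold Spec_list2rank; infer_instance

-- ===== CLAIM (what is proved, stated in full; the proofs are below) =====
def Claim_equal_list2rank : Prop := ∀ (lista : List (String × Int)), Dom_list2rank lista → Pre_list2rank lista → Spec_list2rank lista (list2rank lista)

-- ===== LEMMAS AND PROOFS =====

-- names of the elements of l whose value is v, in order
def gather (l : List (String × Int)) (v : Int) : List String :=
  (l.filter (fun p => p.2 == v)).map (fun p => p.1)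

-- the distinct elements of a list of values, first occurrence first
def distinctsOf : List Int → List Int
  | [] => []
  | v :: xs => v :: distinctsOf (xs.filter (fun w => w ≠ v))
termination_by xs => xs.length
decreasing_by simpa using Nat.lt_succ_of_le (le_trans (List.length_filter_le _ _) (by simp))

-- the adjacency-run shape of A's loop
def runsGo (g : List String) (prev : Int) : List (String × Int) → List (List String)
  | [] => [g]
  | (n, v) :: rest => if v = prev then runsGo (g ++ [n]) prev rest else g :: runsGo [n] v rest

theorem distinctsOf_cons (v : Int) (xs : List Int) :
    distinctsOf (v :: xs) = v :: distinctsOf (xs.filter (fun w => w ≠ v)) := by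
  rw [distinctsOf.eq_def]

theorem mem_distinctsOf (a : Int) : ∀ (xs : List Int), a ∈ distinctsOf xs ↔ a ∈ xs
  | [] => by simp [distinctsOf]
  | v :: xs => by
      rw [distinctsOf_cons]
      by_cases h : a = v
      · simp [h]
      · have ih := mem_distinctsOf a (xs.filter (fun w => w ≠ v))
        simp only [ne_eq, decide_not] at ih
        simp [h, ih, List.mem_filter]
termination_by xs => xs.length
decreasing_by simp [Nat.lt_succ_of_le (List.length_filter_le _ _)]

theorem list2rankGo_eq_runsGo (rest : List (String × Int)) :
    ∀ (ranked : List (List String)) (k : Nat) (prev : Int) (g : List String),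
      ranked.length = k + 1 → ranked.getLast? = some g →
      list2rankGo ranked k prev rest = ranked.dropLast ++ runsGo g prev rest := by
  induction rest with
  | nil =>
      intro ranked k prev g hlen hlast
      simp [list2rankGo, runsGo]
      exact (List.dropLast_append_getLast? _ hlast).symm
  | cons p rest ih =>
      intro ranked k prev g hlen hlast
      obtain ⟨n, v⟩ := p
      have hne : ranked ≠ [] := by intro h; simp [h] at hlen
      have hget : ranked.getD k [] = g := by
        have : ranked.getLast? = ranked[k]? := by
          rw [List.getLast?_eq_getElem?]; congr 1; omega
        rw [List.getD, this.symm, hlast]; rfl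
      by_cases hv : v = prev
      · have hset : ranked.set k (ranked.getD k [] ++ [n]) = ranked.dropLast ++ [g ++ [n]] := by
          rw [hget]
          have hr : ranked.dropLast ++ [g] = ranked := List.dropLast_append_getLast? _ hlast
          have hlen' : ranked.dropLast.length = k := by simp [List.length_dropLast]; omega
          conv_lhs => rw [← hr]
          rw [List.set_append_right _ _ (by omega)]
          simp [hlen']
        rw [list2rankGo, if_pos (by simpa using hv), hset]
        rw [ih (ranked.dropLast ++ [g ++ [n]]) k prev (g ++ [n])
            (by simp [List.length_dropLast]; omega) (by simp)]
        simp [runsGo, hv]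
      · rw [list2rankGo, if_neg (by simpa using hv)]
        rw [ih (ranked ++ [[n]]) (k + 1) v [n] (by simp [hlen]) (by simp)]
        have hdrop : (ranked ++ [[n]]).dropLast = ranked := by simp
        rw [hdrop, runsGo, if_neg hv]
        rw [(List.dropLast_append_getLast? _ hlast).symm]
        simp

theorem runsGo_eq (rest : List (String × Int)) :
    ∀ (g : List String) (v : Int),
      List.Pairwise (fun a b => a.2 ≤ b.2) rest → (∀ p ∈ rest, v ≤ p.2) →
      runsGo g v rest =
        (g ++ gather rest v) ::
          (distinctsOf ((rest.map (fun p => p.2)).filter (fun w => w ≠ v))).map (gather rest) := by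
  induction rest with
  | nil => intro g v _ _; simp [runsGo, gather, distinctsOf]
  | cons p rest ih =>
      intro g v hpw hge
      obtain ⟨n, w⟩ := p
      have hpw' : List.Pairwise (fun a b => a.2 ≤ b.2) rest := hpw.of_cons
      have hwle : ∀ q ∈ rest, w ≤ q.2 := by
        intro q hq; exact List.rel_of_pairwise_cons hpw hq
      have hgcons : gather ((n, w) :: rest) w = n :: gather rest w := by
        simp [gather]
      by_cases hv : w = v
      · subst hv
        rw [runsGo, if_pos rfl, ih (g ++ [n]) w hpw' hwle]
        have hfil : (((n, w) :: rest).map (fun p => p.2)).filter (fun x => x ≠ w)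
            = (rest.map (fun p => p.2)).filter (fun x => x ≠ w) := by simp
        rw [hfil]
        congr 1
        · rw [hgcons]; simp
        · apply List.map_congr_left
          intro x hx
          have hxne : x ≠ w := by
            have := (mem_distinctsOf x _).mp hx
            simp at this; exact this.2
          simp [gather, Ne.symm hxne]
      · have hlt : v < w := lt_of_le_of_ne (hge (n, w) (by simp)) (Ne.symm hv)
        have hrest_gt : ∀ q ∈ rest, v < q.2 := fun q hq => lt_of_lt_of_le hlt (hwle q hq)
        rw [runsGo, if_neg hv, ih [n] w hpw' hwle]
        have hgv : gather ((n, w) :: rest) v = [] := by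
          simp only [gather, List.map_eq_nil_iff, List.filter_eq_nil_iff]
          intro q hq
          rcases List.mem_cons.mp hq with rfl | hq'
          · simpa using hv
          · simpa using (ne_of_gt (hrest_gt q hq'))
        have hfil : (((n, w) :: rest).map (fun p => p.2)).filter (fun x => x ≠ v)
            = w :: (rest.map (fun p => p.2)).filter (fun x => x ≠ v) := by
          simp only [List.map_cons, List.filter_cons]
          rw [if_pos (by simpa using hv)]
        have hfil2 : ((rest.map (fun p => p.2)).filter (fun x => x ≠ v)).filter (fun x => x ≠ w)
            = (rest.map (fun p => p.2)).filter (fun x => x ≠ w) := by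
          rw [List.filter_filter]
          apply List.filter_congr
          intro x hx
          simp only [List.mem_map] at hx
          obtain ⟨q, hq, rfl⟩ := hx
          simp [ne_of_gt (hrest_gt q hq)]
        rw [hgv, hfil, distinctsOf_cons, hfil2]
        congr 1
        · simp
        · congr 1
          · rw [hgcons]; simp
          · apply List.map_congr_left
            intro x hx
            have hxne : x ≠ w := by
              have := (mem_distinctsOf x _).mp hx
              simp at this; exact this.2
            simp [gather, Ne.symm hxne]

-- ===== stability of PySem.List.sorted with respect to one key class =====

theorem insertBy_mem {α : Type} (before : α → α → Bool) (x a : α) (l : List α) :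
    a ∈ PySem.List.insertBy before x l ↔ a = x ∨ a ∈ l := by
  induction l with
  | nil => simp [PySem.List.insertBy]
  | cons y ys ih =>
      rw [PySem.List.insertBy]
      split_ifs <;> (simp [ih]; try tauto)

theorem insertBy_pairwise_le (x : String × Int) (l : List (String × Int)) :
    List.Pairwise (fun a b => a.2 ≤ b.2) l →
    List.Pairwise (fun a b => a.2 ≤ b.2)
      (PySem.List.insertBy (fun a b => decide (a.2 < b.2)) x l) := by
  induction l with
  | nil => intro _; simp [PySem.List.insertBy]
  | cons y ys ih =>
      intro hpw
      rw [PySem.List.insertBy]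
      split_ifs with h
      · refine List.Pairwise.cons ?_ hpw
        intro b hb
        rcases hb with _ | hb
        · exact le_of_lt (by simpa using h)
        · exact le_trans (le_of_lt (by simpa using h)) (List.rel_of_pairwise_cons hpw (by assumption))
      · refine List.Pairwise.cons ?_ (ih hpw.of_cons)
        intro b hb
        rcases (insertBy_mem _ _ _ _).mp hb with rfl | hb
        · simpa using h
        · exact List.rel_of_pairwise_cons hpw hb

theorem insertBy_filter (v : Int) (x : String × Int) :
    ∀ (l : List (String × Int)), List.Pairwise (fun a b => a.2 ≤ b.2) l →
    (PySem.List.insertBy (fun a b => decide (a.2 < b.2)) x l).filter (fun p => p.2 == v)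
      = l.filter (fun p => p.2 == v) ++ (if x.2 = v then [x] else [])
  | [] => by
      intro _
      rw [PySem.List.insertBy]
      by_cases hx : x.2 = v
      · rw [if_pos hx]; simp [hx]
      · rw [if_neg hx]; simp [hx]
  | y :: ys => by
      intro hpw
      rw [PySem.List.insertBy]
      by_cases h : decide (x.2 < y.2) = true
      · rw [if_pos h]
        by_cases hx : x.2 = v
        · have hlt : v < y.2 := by rw [← hx]; exact of_decide_eq_true h
          have hnil : (y :: ys).filter (fun p => p.2 == v) = [] := by
            apply List.filter_eq_nil_iff.mpr
            intro q hq
            rcases List.mem_cons.mp hq with rfl | hq'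
            · simpa using (ne_of_gt hlt)
            · simpa using ne_of_gt (lt_of_lt_of_le hlt (List.rel_of_pairwise_cons hpw hq'))
          rw [if_pos hx, List.filter_cons, if_pos (by simpa using hx), hnil]
          simp
        · rw [if_neg hx, List.filter_cons, if_neg (by simpa using hx)]
          simp
      · rw [if_neg h, List.filter_cons, insertBy_filter v x ys hpw.of_cons, List.filter_cons]
        by_cases hy : (y.2 == v) = true
        · rw [if_pos hy, if_pos hy]; simp
        · rw [if_neg hy, if_neg hy]

theorem sorted_foldl_filter (v : Int) (xs : List (String × Int)) :
    ∀ (acc : List (String × Int)), List.Pairwise (fun a b => a.2 ≤ b.2) acc →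
      (xs.foldl (fun acc x => PySem.List.insertBy (fun a b => decide (a.2 < b.2)) x acc) acc).filter
          (fun p => p.2 == v)
        = acc.filter (fun p => p.2 == v) ++ xs.filter (fun p => p.2 == v) := by
  induction xs with
  | nil => intro acc _; simp
  | cons x xs ih =>
      intro acc hpw
      rw [List.foldl_cons, ih _ (insertBy_pairwise_le x acc hpw), insertBy_filter v x acc hpw,
          List.filter_cons]
      by_cases h : x.2 = v
      · rw [if_pos h, if_pos (by simpa using h)]
        simp
      · rw [if_neg h, if_neg (by simpa using h)]
        simp

theorem sorted_stable_filter (lista : List (String × Int)) (v : Int) :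
    (PySem.List.sorted lista (fun x => x.2)).filter (fun p => p.2 == v)
      = lista.filter (fun p => p.2 == v) := by
  have := sorted_foldl_filter v lista [] (by simp)
  simpa [PySem.List.sorted] using this

theorem gather_sorted (lista : List (String × Int)) (v : Int) :
    gather (PySem.List.sorted lista (fun x => x.2)) v = gather lista v := by
  simp [gather, sorted_stable_filter]

-- ===== the dict side =====

theorem keys_insert (d : PySem.Dict Int (List String)) (k : Int) (x : List String) :
    (d.insert k x).keys = if k ∈ d.keys then d.keys else d.keys ++ [k] := by
  have hc : d.contains k = true ↔ k ∈ d.keys := by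
    simp [PySem.Dict.contains, PySem.Dict.keys, List.any_eq_true]
  by_cases h : k ∈ d.keys
  · rw [if_pos h]
    rw [PySem.Dict.insert, if_pos (hc.mpr h)]
    simp only [PySem.Dict.keys, List.map_map]
    apply List.map_congr_left
    intro p _
    by_cases hp : p.1 = k <;> simp [hp]
  · rw [if_neg h]
    rw [PySem.Dict.insert, if_neg (by rw [hc]; simpa using h)]
    simp [PySem.Dict.keys]

theorem foldl_dict_getD (lista : List (String × Int)) :
    ∀ (d : PySem.Dict Int (List String)) (v : Int),
      (lista.foldl (fun d p => d.insert p.2 (d.getD p.2 [] ++ [p.1])) d).getD v []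
        = d.getD v [] ++ gather lista v := by
  induction lista with
  | nil => intro d v; simp [gather]
  | cons p rest ih =>
      intro d v
      rw [List.foldl_cons, ih]
      rw [PySem.Dict.getD_insert]
      by_cases h : v = p.2
      · rw [if_pos h, h]
        simp [gather]
      · rw [if_neg h]
        have hne : ¬ p.2 = v := fun hh => h hh.symm
        have : gather (p :: rest) v = gather rest v := by
          simp [gather, hne]
        rw [this]

theorem foldl_dict_keys (lista : List (String × Int)) :
    ∀ (d : PySem.Dict Int (List String)),
      ((lista.foldl (fun d p => d.insert p.2 (d.getD p.2 [] ++ [p.1])) d).keys.Nodup ↔ d.keys.Nodup)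
      ∧ ∀ v, (v ∈ (lista.foldl (fun d p => d.insert p.2 (d.getD p.2 [] ++ [p.1])) d).keys
              ↔ v ∈ d.keys ∨ v ∈ lista.map (fun p => p.2)) := by
  induction lista with
  | nil => intro d; simp
  | cons p rest ih =>
      intro d
      rw [List.foldl_cons]
      obtain ⟨ihn, ihm⟩ := ih (d.insert p.2 (d.getD p.2 [] ++ [p.1]))
      rw [keys_insert] at ihn ihm
      constructor
      · rw [ihn]
        split_ifs with h
        · rfl
        · simp [List.nodup_append]
          exact fun _ a ha hap => h (hap ▸ ha)
      · intro v
        rw [ihm v]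
        split_ifs with h
        · by_cases hv : v = p.2 <;> simp [hv, h]
        · by_cases hv : v = p.2 <;> simp [hv]

theorem distinctsOf_nodup : ∀ (xs : List Int), (distinctsOf xs).Nodup
  | [] => by simp [distinctsOf]
  | v :: xs => by
      rw [distinctsOf_cons]
      refine List.Nodup.cons ?_ (distinctsOf_nodup _)
      intro h
      have := (mem_distinctsOf v _).mp h
      simp at this
termination_by xs => xs.length
decreasing_by simp [Nat.lt_succ_of_le (List.length_filter_le _ _)]

theorem distinctsOf_pairwise_lt : ∀ (xs : List Int),
    List.Pairwise (· ≤ ·) xs → List.Pairwise (· < ·) (distinctsOf xs)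
  | [] => by intro _; simp [distinctsOf]
  | v :: xs => by
      intro hpw
      rw [distinctsOf_cons]
      refine List.Pairwise.cons ?_
        (distinctsOf_pairwise_lt _ (hpw.of_cons.sublist List.filter_sublist))
      intro b hb
      have hmem := (mem_distinctsOf b _).mp hb
      simp only [List.mem_filter] at hmem
      exact lt_of_le_of_ne (List.rel_of_pairwise_cons hpw hmem.1) (Ne.symm (by simpa using hmem.2))
termination_by xs => xs.length
decreasing_by simp [Nat.lt_succ_of_le (List.length_filter_le _ _)]

-- ===== main assembly =====

theorem list2rank_eq_canonical (lista : List (String × Int)) (h : lista ≠ []) :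
    list2rank lista
      = (distinctsOf ((PySem.List.sorted lista (fun x => x.2)).map (fun p => p.2))).map
          (gather (PySem.List.sorted lista (fun x => x.2))) := by
  have hperm := PySem.List.sorted_perm lista (fun x => x.2) false
  have hpw := PySem.List.sorted_pairwise lista (fun x => x.2)
  rcases hord : PySem.List.sorted lista (fun x => x.2) with _ | ⟨⟨n, v⟩, rest⟩
  · apply absurd _ h
    have h0 : ([] : List (String × Int)).Perm lista := by rw [← hord]; exact hperm
    exact h0.symm.eq_nil
  · rw [hord] at hpw
    unfold list2rank
    rw [hord]
    show list2rankGo [[n]] 0 v rest = _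
    rw [list2rankGo_eq_runsGo rest [[n]] 0 v [n] (by simp) (by simp)]
    rw [runsGo_eq rest [n] v hpw.of_cons (fun p hp => List.rel_of_pairwise_cons hpw hp)]
    simp only [List.dropLast_singleton, List.nil_append, List.map_cons]
    rw [distinctsOf_cons, List.map_cons]
    congr 1
    · have hg : gather ((n, v) :: rest) v = n :: gather rest v := by
        simp [gather]
      rw [hg]; simp
    · apply List.map_congr_left
      intro x hx
      have hxne : x ≠ v := by
        have := (mem_distinctsOf x _).mp hx
        simp at this; exact this.2
      simp [gather, Ne.symm hxne]

theorem list2rank_alt_eq_canonical (lista : List (String × Int)) :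
    list2rank_alt lista
      = (distinctsOf ((PySem.List.sorted lista (fun x => x.2)).map (fun p => p.2))).map
          (gather lista) := by
  have hperm := PySem.List.sorted_perm lista (fun x => x.2) false
  have hpw := PySem.List.sorted_pairwise lista (fun x => x.2)
  have hK : PySem.List.sorted
        (lista.foldl (fun d p => d.insert p.2 (d.getD p.2 [] ++ [p.1])) (PySem.Dict.mk [])).keys
        (fun v => v)
      = distinctsOf ((PySem.List.sorted lista (fun x => x.2)).map (fun p => p.2)) := by
    apply PySem.List.sorted_eq_of_perm_of_pairwise_lt
    · obtain ⟨hn, hm⟩ := foldl_dict_keys lista (PySem.Dict.mk [])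
      apply (List.perm_ext_iff_of_nodup (distinctsOf_nodup _)
        (hn.mpr (by simp [PySem.Dict.keys]))).mpr
      intro a
      rw [mem_distinctsOf, hm a]
      have hmm : a ∈ (PySem.List.sorted lista (fun x => x.2)).map (fun p => p.2)
          ↔ a ∈ lista.map (fun p => p.2) := (hperm.map (fun p => p.2)).mem_iff
      simp [hmm, PySem.Dict.keys]
    · exact distinctsOf_pairwise_lt _ ((hpw.map _ (fun a b h => h)))
  unfold list2rank_alt
  show (PySem.List.sorted
        (lista.foldl (fun d p => d.insert p.2 (d.getD p.2 [] ++ [p.1])) (PySem.Dict.mk [])).keys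
        (fun v => v)).map
      (fun v => (lista.foldl (fun d p => d.insert p.2 (d.getD p.2 [] ++ [p.1]))
        (PySem.Dict.mk [])).getD v []) = _
  rw [hK]
  apply List.map_congr_left
  intro v _
  rw [foldl_dict_getD lista (PySem.Dict.mk []) v]
  simp [PySem.Dict.getD, PySem.Dict.get?]

-- ===== VERDICT (by name: the statement is the Claim_ definition above) =====
theorem list2rank_spec : Claim_equal_list2rank := by
  intro lista _ hpre
  unfold Spec_list2rank
  rw [list2rank_eq_canonical lista hpre, list2rank_alt_eq_canonical lista]
  apply List.map_congr_left
  intro v _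
  exact gather_sorted lista v
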